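-- pv_equiv track=rewrite | github.com/CODE-U-S/Coding_Test_Study | 2st/Yeonwoo/배열 만들기 4.py | solution
-- ===== SOURCE A (Python) =====
-- def solution(arr):
--     stk = []
--     i=0
--     while i < len(arr):
--         if stk==[]:
--             stk.append(arr[i])
--             i+=1
--         elif stk!=[] and stk[-1] < arr[i]:
--             stk.append(arr[i])
--             i+=1
--         elif stk!=[] and stk[-1] >= arr[i]:
--             stk.remove(stk[-1])
--     return stk
-- ===== SOURCE B (Python) =====
-- def solution(arr):
--     # Right-to-left scan: keep arr[j] iff it is strictly smaller than the
--     # running minimum of everything to its right; reverse at the end.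
--     res = []
--     m = None
--     for x in reversed(arr):
--         if m is None or x < m:
--             res.append(x)
--             m = x
--     return res[::-1]
-- ===== Notes on version B (the rewrite author's own statement) =====
-- stated objective: faster
-- what changed: Replaces the stack with repeated pop-by-remove (quadratic in the worst case) by a single right-to-left pass keeping a running suffix minimum and reversing the collected elements.
import Mathlib
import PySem

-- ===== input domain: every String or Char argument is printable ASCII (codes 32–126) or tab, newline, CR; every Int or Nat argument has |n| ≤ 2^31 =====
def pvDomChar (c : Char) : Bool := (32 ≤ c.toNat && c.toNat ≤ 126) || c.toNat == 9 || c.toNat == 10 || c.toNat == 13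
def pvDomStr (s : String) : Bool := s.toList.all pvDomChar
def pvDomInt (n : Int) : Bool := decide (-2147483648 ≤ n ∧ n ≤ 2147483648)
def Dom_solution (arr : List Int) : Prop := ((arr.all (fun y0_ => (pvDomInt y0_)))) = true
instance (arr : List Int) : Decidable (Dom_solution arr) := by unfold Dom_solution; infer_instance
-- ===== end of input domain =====

-- B replaces A's stack-with-remove loop (worst-case quadratic) by one linear
-- right-to-left pass keeping the running suffix minimum.

-- ===== PORT A =====
-- termination helper for the pop branch: removing stk[-1] shortens the stack
theorem pvRemoveLen (stk : List Int) (h : stk ≠ []) :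
    ((PySem.List.remove? stk (stk.getLast h)).getD []).length < stk.length := by
  rw [PySem.List.remove?_eq_some_erase stk (stk.getLast h) (List.getLast_mem h)]
  have := List.length_erase_of_mem (List.getLast_mem h)
  have : 0 < stk.length := List.length_pos_of_ne_nil h
  simp [List.length_erase_of_mem (List.getLast_mem h)]
  omega

-- the while loop of A: state (i, stk); stk[-1] is the getLast of the nonempty
-- stack, stk.remove(stk[-1]) is PySem.List.remove? (its [] default is
-- unreachable since stk[-1] ∈ stk, where Python would raise ValueError)
def solGo (arr : List Int) (i : Nat) (stk : List Int) : List Int :=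
  if h : i < arr.length then
    if he : stk = [] then
      solGo arr (i + 1) (stk ++ [arr[i]])
    else if stk.getLast he < arr[i] then
      solGo arr (i + 1) (stk ++ [arr[i]])
    else
      solGo arr i ((PySem.List.remove? stk (stk.getLast he)).getD [])
  else stk
termination_by 2 * (arr.length - i) + stk.length
decreasing_by
  · simp; omega
  · simp; omega
  · have := pvRemoveLen stk he; omega

def solution (arr : List Int) : List Int := solGo arr 0 []

-- ===== PORT B =====
-- one step of B's loop over reversed(arr): state (res, m)
def altStep (st : List Int × Option Int) (x : Int) : List Int × Option Int :=
  match st.2 with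
  | none => (st.1 ++ [x], some x)
  | some m => if x < m then (st.1 ++ [x], some x) else st

def solution_alt (arr : List Int) : List Int :=
  (arr.reverse.foldl altStep ([], none)).1.reverse

-- ===== PRECONDITION & SPEC =====
def Spec_solution (arr : List Int) (out : List Int) : Prop := out = solution_alt arr
instance (arr : List Int) (out : List Int) : Decidable (Spec_solution arr out) := by unfold Spec_solution; infer_instance

-- ===== CLAIM (what is proved, stated in full; the proofs are below) =====
def Claim_equal_solution : Prop := ∀ (arr : List Int), Dom_solution arr → Spec_solution arr (solution arr)

-- ===== LEMMAS AND PROOFS =====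

-- common reference value: keep y iff y is smaller than everything after it and
-- (when m = some v) smaller than v
def pvCond (m : Option Int) (x : Int) : Bool :=
  match m with
  | none => true
  | some v => decide (x < v)

def pvSpec : List Int → Option Int → List Int
  | [], _ => []
  | y :: t, m =>
    if (t.all fun z => decide (y < z)) && pvCond m y then y :: pvSpec t m else pvSpec t m

-- B side ------------------------------------------------------------------

def pvGB : List Int → Option Int → List Int
  | [], _ => []
  | x :: t, m => if pvCond m x then x :: pvGB t (some x) else pvGB t m

theorem pvFold_eq_gB (l : List Int) (res : List Int) (m : Option Int) :
    (l.foldl altStep (res, m)).1 = res ++ pvGB l m := by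
  induction l generalizing res m with
  | nil => simp [pvGB]
  | cons x t ih =>
    cases m with
    | none => simp [altStep, pvGB, pvCond, ih]
    | some v =>
      by_cases hx : x < v
      · simp [altStep, pvGB, pvCond, hx, ih]
      · simp [altStep, pvGB, pvCond, hx, ih]

theorem pvSpec_append (ys : List Int) (x : Int) (m : Option Int) :
    pvSpec (ys ++ [x]) m =
      pvSpec ys (if pvCond m x then some x else m) ++ (if pvCond m x then [x] else []) := by
  induction ys generalizing m with
  | nil => by_cases h : pvCond m x = true <;> simp [pvSpec, h]
  | cons y t ih =>
    have hb : (decide (y < x) && pvCond m y) = pvCond (if pvCond m x then some x else m) y := by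
      cases m with
      | none => simp [pvCond]
      | some v =>
        by_cases hxv : x < v <;> by_cases hyx : y < x <;> by_cases hyv : y < v <;>
          simp [pvCond, hxv, hyx, hyv] <;> omega
    simp only [List.cons_append, pvSpec, List.all_append, List.all_cons, List.all_nil,
      Bool.and_true, ih, ← hb, Bool.and_assoc, List.cons_append]
    split <;> simp

theorem pvGB_reverse (arr : List Int) : ∀ m, pvGB arr.reverse m = (pvSpec arr m).reverse := by
  induction arr using List.reverseRecOn with
  | nil => intro m; simp [pvGB, pvSpec]
  | append_singleton ys x ih =>
    intro m
    rw [List.reverse_append, List.reverse_cons, List.reverse_nil, List.nil_append,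
      List.singleton_append, pvSpec_append]
    by_cases h : pvCond m x = true
    · simp [pvGB, h, ih]
    · simp [pvGB, h, ih]

theorem pvAlt_eq_spec (arr : List Int) : solution_alt arr = pvSpec arr none := by
  unfold solution_alt
  rw [pvFold_eq_gB, List.nil_append, pvGB_reverse, List.reverse_reverse]

-- A side ------------------------------------------------------------------

def pvStep (stk : List Int) (x : Int) : List Int :=
  stk.takeWhile (fun s => decide (s < x)) ++ [x]

theorem pvMem_le_getLast {stk : List Int} (hp : List.Pairwise (· < ·) stk)
    (he : stk ≠ []) {s : Int} (hs : s ∈ stk) : s ≤ stk.getLast he := by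
  induction stk with
  | nil => exact absurd rfl he
  | cons a t ih =>
    cases t with
    | nil => simp at hs; simp [hs, List.getLast]
    | cons b u =>
      rcases List.mem_cons.mp hs with h | h
      · subst h
        have : s < (b :: u).getLast (by simp) :=
          (List.pairwise_cons.mp hp).1 _ (List.getLast_mem _)
        rw [List.getLast_cons (by simp)]
        exact le_of_lt this
      · rw [List.getLast_cons (by simp)]
        exact ih (List.pairwise_cons.mp hp).2 (by simp) h

theorem pvErase_getLast {stk : List Int} (hp : List.Pairwise (· < ·) stk) (he : stk ≠ []) :
    (PySem.List.remove? stk (stk.getLast he)).getD [] = stk.dropLast := by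
  rw [PySem.List.remove?_eq_some_erase stk (stk.getLast he) (List.getLast_mem he),
    Option.getD_some]
  have hnd : stk.Nodup := List.Pairwise.imp ne_of_lt hp
  obtain ⟨l, x, rfl⟩ : ∃ l x, stk = l ++ [x] :=
    ⟨stk.dropLast, stk.getLast he, (List.dropLast_append_getLast he).symm⟩
  have hx : x ∉ l := by
    intro hmem
    exact (List.nodup_append.mp hnd).2.2 x hmem x (List.mem_singleton.mpr rfl) rfl
  rw [List.getLast_append_singleton, List.erase_append_right _ hx]
  simp

theorem pvTakeWhile_concat_neg {α : Type} (p : α → Bool) (l : List α) (a : α)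
    (hpa : p a = false) : (l ++ [a]).takeWhile p = l.takeWhile p := by
  rw [List.takeWhile_append]
  split
  · next h =>
    rw [(List.takeWhile_prefix p).eq_of_length h]
    simp [hpa]
  · rfl

theorem pvSolGo_foldl (arr : List Int) (i : Nat) (stk : List Int) :
    List.Pairwise (· < ·) stk → solGo arr i stk = (arr.drop i).foldl pvStep stk := by
  induction i, stk using solGo.induct arr with
  | case1 i h ih =>
    intro hp
    rw [solGo, dif_pos h, dif_pos rfl, ih (by simp), List.drop_eq_getElem_cons h,
      List.foldl_cons]
    simp [pvStep]
  | case2 i stk h he hlt ih =>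
    intro hp
    have hall : ∀ a ∈ stk, a < arr[i] :=
      fun a ha => lt_of_le_of_lt (pvMem_le_getLast hp he ha) hlt
    have hp' : List.Pairwise (· < ·) (stk ++ [arr[i]]) :=
      List.pairwise_append.mpr ⟨hp, List.pairwise_singleton _ _,
        fun a ha b hb => by simp at hb; subst hb; exact hall a ha⟩
    rw [solGo, dif_pos h, dif_neg he, if_pos hlt, ih hp', List.drop_eq_getElem_cons h,
      List.foldl_cons, pvStep, List.takeWhile_eq_self_iff.mpr (by
        intro a ha; simpa using hall a ha)]
  | case3 i stk h he hlt ih =>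
    intro hp
    have hp' : List.Pairwise (· < ·) stk.dropLast :=
      hp.sublist (List.dropLast_sublist stk)
    have herase := pvErase_getLast hp he
    have ih' := ih (by rw [herase]; exact hp')
    rw [herase] at ih'
    rw [solGo, dif_pos h, dif_neg he, if_neg hlt, herase, ih',
      List.drop_eq_getElem_cons h, List.foldl_cons, List.foldl_cons]
    have hstep : pvStep stk arr[i] = pvStep stk.dropLast arr[i] := by
      unfold pvStep
      conv_lhs => rw [← List.dropLast_append_getLast he]
      rw [pvTakeWhile_concat_neg _ _ _ (by simpa using hlt)]
    rw [hstep]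
  | case4 i stk h =>
    intro hp
    rw [solGo, dif_neg h, List.drop_eq_nil_of_le (Nat.le_of_not_lt h), List.foldl_nil]

theorem pvFoldl_step (l : List Int) (stk : List Int) (hp : List.Pairwise (· < ·) stk) :
    l.foldl pvStep stk =
      stk.takeWhile (fun s => l.all fun z => decide (s < z)) ++ pvSpec l none := by
  induction l generalizing stk with
  | nil =>
    rw [List.foldl_nil, pvSpec, List.append_nil,
      List.takeWhile_eq_self_iff.mpr (by intro a _; simp)]
  | cons x t ih =>
    have hsub : ∀ a ∈ stk.takeWhile (fun s => decide (s < x)), a < x := by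
      intro a ha
      simpa using List.mem_takeWhile_imp ha
    have hp' : List.Pairwise (· < ·) (stk.takeWhile (fun s => decide (s < x)) ++ [x]) :=
      List.pairwise_append.mpr ⟨hp.sublist (List.takeWhile_sublist _),
        List.pairwise_singleton _ _,
        fun a ha b hb => by simp at hb; subst hb; exact hsub a ha⟩
    rw [List.foldl_cons, pvStep, ih _ hp']
    by_cases hx : (t.all fun z => decide (x < z)) = true
    · have hxall : ∀ z ∈ t, x < z := fun z hz => by
        simpa using List.all_eq_true.mp hx z hz
      have h1 : (stk.takeWhile (fun s => decide (s < x)) ++ [x]).takeWhile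
            (fun s => t.all fun z => decide (s < z)) =
          stk.takeWhile (fun s => decide (s < x)) ++ [x] := by
        refine List.takeWhile_eq_self_iff.mpr ?_
        intro a ha
        rcases List.mem_append.mp ha with ha | ha
        · exact List.all_eq_true.mpr fun z hz => by
            simpa using lt_trans (hsub a ha) (hxall z hz)
        · simp at ha; subst ha; exact hx
      have h2 : (fun s => (x :: t).all fun z => decide (s < z)) =
          (fun s : Int => decide (s < x)) := by
        funext s
        by_cases hs : s < x
        · simp [hs]
          intro z hz
          exact lt_trans hs (hxall z hz)
        · simp [hs]
      rw [h1, h2, pvSpec]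
      simp [hx, pvCond]
    · have h1 : (stk.takeWhile (fun s => decide (s < x)) ++ [x]).takeWhile
            (fun s => t.all fun z => decide (s < z)) =
          (stk.takeWhile (fun s => decide (s < x))).takeWhile
            (fun s => t.all fun z => decide (s < z)) :=
        pvTakeWhile_concat_neg _ _ _ (by simpa using hx)
      rw [h1, List.takeWhile_takeWhile]
      have h2 : (fun a : Int => decide ((t.all fun z => decide (a < z)) = true ∧
            decide (a < x) = true)) =
          (fun s => (x :: t).all fun z => decide (s < z)) := by
        funext a
        simp only [List.all_cons]
        rw [Bool.and_comm, Bool.eq_iff_iff]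
        simp
      have h3 : pvSpec (x :: t) none = pvSpec t none := by
        rw [pvSpec]
        simp [pvCond, hx]
      rw [h2, h3]

-- ===== VERDICT (by name: the statement is the Claim_ definition above) =====
theorem solution_spec : Claim_equal_solution := by
  intro arr _
  unfold Spec_solution solution
  rw [pvSolGo_foldl arr 0 [] (by simp), List.drop_zero,
    pvFoldl_step arr [] (by simp), pvAlt_eq_spec]
  simp
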